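-- pv_equiv track=rewrite | github.com/AlgorithmWithFriend/Day1 | LEVEL2/Day011/parenthesisConversions.py | parse
-- ===== SOURCE A (Python) =====
-- def parse(s):
--     correct = True
--     left = 0
--     right = 0
--     stacks = []
--
--     for i in range(len(s)):
--         if s[i] == '(':
--             left += 1
--             stacks.append('(')
--         else:
--             right += 1
--             # 쌍이 안 맞는경우, 즉 열린괄호가 없는경우
--             if len(stacks) == 0:
--                 correct = False
--             else:
--                 stacks.pop()
--         # left와 right가 같아질 경우 최초로 가장 작은 길이의 균형잡힌 문자열 u가 만들어짐
--         # 위치는 v의 시작위치로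
--         if left == right:
--             return i + 1, correct
--
--     # 지문에는 입력문자열이 균형잡힌 괄호문자열만 있다해서 상관없지만
--     # 예외처리를 위한 부분
--     return 0, False
-- ===== SOURCE B (Python) =====
-- def parse(s):
--     # build the full prefix-balance table first
--     table = []
--     bal = 0
--     for c in s:
--         bal += 1 if c == '(' else -1
--         table.append(bal)
--     # scan the table for the first zero, tracking whether it ever went negative
--     neg = False
--     for i, b in enumerate(table):
--         if b < 0:
--             neg = True
--         if b == 0:
--             return i + 1, not neg
--     return 0, False
-- ===== Notes on version B (the rewrite author's own statement) =====
-- stated objective: alternative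
-- what changed: B precomputes the full prefix-balance table (+1/-1) and then scans it for the first zero with a seen-negative flag, replacing A's incremental stack plus separate left/right counters.
import Mathlib
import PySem

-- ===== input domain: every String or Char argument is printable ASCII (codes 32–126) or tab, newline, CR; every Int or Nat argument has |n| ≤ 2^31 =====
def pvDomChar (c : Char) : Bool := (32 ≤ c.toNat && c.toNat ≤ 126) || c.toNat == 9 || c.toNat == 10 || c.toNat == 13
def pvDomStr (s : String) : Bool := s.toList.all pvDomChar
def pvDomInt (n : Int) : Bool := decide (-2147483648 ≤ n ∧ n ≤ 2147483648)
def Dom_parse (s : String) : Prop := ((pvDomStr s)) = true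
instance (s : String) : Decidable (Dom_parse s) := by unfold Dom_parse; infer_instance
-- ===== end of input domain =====

-- B builds the full prefix-balance table and scans it for the first zero with a
-- seen-negative flag, instead of A's incremental stack with left/right counters
-- (alternative decomposition, same cost).


-- ===== PORT A =====
-- loop over the characters, keeping A's state: index i, correct flag, left/right
-- counters and the stack (append at the end, pop from the end, as in Python)
def parseLoop : List Char → Int → Bool → Int → Int → List Char → Int × Bool
  | [], _, _, _, _, _ => (0, false)
  | c :: rest, i, correct, left, right, stk =>
    if c = '(' then
      let left := left + 1
      let stk := stk ++ ['(']
      if left = right then (i + 1, correct)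
      else parseLoop rest (i + 1) correct left right stk
    else
      let right := right + 1
      if stk.length = 0 then
        if left = right then (i + 1, false)
        else parseLoop rest (i + 1) false left right stk
      else
        let stk := stk.dropLast
        if left = right then (i + 1, correct)
        else parseLoop rest (i + 1) correct left right stk

def parse (s : String) : Int × Bool := parseLoop s.toList 0 true 0 0 []

-- ===== PORT B =====
-- first pass: the prefix-balance table
def balTable : List Char → Int → List Int
  | [], _ => []
  | c :: rest, bal =>
    let bal := bal + (if c = '(' then 1 else -1)
    bal :: balTable rest bal

-- second pass: scan the table for the first zero, tracking a seen-negative flag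
def scanTable : List Int → Int → Bool → Int × Bool
  | [], _, _ => (0, false)
  | b :: rest, i, neg =>
    let neg := if b < 0 then true else neg
    if b = 0 then (i + 1, !neg) else scanTable rest (i + 1) neg

def parse_alt (s : String) : Int × Bool := scanTable (balTable s.toList 0) 0 false

-- ===== PRECONDITION & SPEC =====
def Spec_parse (s : String) (out : Int × Bool) : Prop := out = parse_alt s
instance (s : String) (out : Int × Bool) : Decidable (Spec_parse s out) := by unfold Spec_parse; infer_instance

-- ===== CLAIM (what is proved, stated in full; the proofs are below) =====
def Claim_equal_parse : Prop := ∀ (s : String), Dom_parse s → Spec_parse s (parse s)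

-- ===== LEMMAS AND PROOFS =====

-- Invariant: with m the running minimum of the prefix balances (m ≤ 0),
-- A's stack size is (left-right) - m and A's flag is the negation of B's
-- seen-negative flag (neg = true iff m < 0).
theorem parseLoop_eq_scanTable (cs : List Char) :
    ∀ (i left right m : Int) (stk : List Char),
      m ≤ 0 → m ≤ left - right →
      (stk.length : Int) = left - right - m →
      parseLoop cs i (!(decide (m < 0))) left right stk
        = scanTable (balTable cs (left - right)) i (decide (m < 0)) := by
  induction cs with
  | nil => intro i left right m stk _ _ _; simp [parseLoop, balTable, scanTable]
  | cons c rest ih =>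
    intro i left right m stk hm0 hmb hlen
    by_cases hc : c = '('
    · -- '(' : the balance goes up by one, the running minimum m is unchanged
      simp only [parseLoop, balTable, scanTable, hc, if_true]
      have hflag : (if left - right + (1:Int) < 0 then true else decide (m < 0))
          = decide (m < 0) := by
        split_ifs with h
        · have : m < 0 := by omega
          simp [this]
        · rfl
      rw [hflag]
      by_cases hz : left + 1 = right
      · have hz' : left - right + (1:Int) = 0 := by omega
        simp [hz, hz']
      · have hz' : ¬ (left - right + (1:Int) = 0) := by omega
        have hrec := ih (i + 1) (left + 1) right m (stk ++ ['('])
          hm0 (by omega) (by simp; omega)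
        have harg : left + 1 - right = left - right + 1 := by omega
        rw [harg] at hrec
        simp [hz, hz', hrec]
    · -- not '(' : the balance goes down by one
      simp only [parseLoop, balTable, scanTable, hc, if_false]
      by_cases hst : stk.length = 0
      · -- empty stack: A sets correct := false; the new balance equals m-1 < 0,
        -- so B's seen-negative flag becomes true
        have hbal : left - right = m := by
          have : (stk.length : Int) = 0 := by exact_mod_cast hst
          omega
        have hneg : left - right + (-1:Int) < 0 := by omega
        have hz' : ¬ (left - right + (-1:Int) = 0) := by omega
        have hz : ¬ (left = right + 1) := by omega
        have hrec := ih (i + 1) left (right + 1) (m - 1) stk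
          (by omega) (by omega) (by omega)
        have hm1 : (decide (m - 1 < 0)) = true := by simp; omega
        rw [hm1] at hrec
        have harg : left - (right + 1) = left - right + (-1) := by omega
        rw [harg] at hrec
        simp only [Bool.not_true] at hrec
        simp [hst, hz, hz', hneg, hrec]
      · -- nonempty stack: A pops; m is unchanged
        have hlen' : (0:Int) < (stk.length : Int) := by
          have : 0 < stk.length := Nat.pos_of_ne_zero hst
          exact_mod_cast this
        have hflag : (if left - right + (-1:Int) < 0 then true else decide (m < 0))
            = decide (m < 0) := by
          split_ifs with h
          · have : m < 0 := by omega
            simp [this]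
          · rfl
        rw [hflag]
        by_cases hz : left = right + 1
        · have hz' : left - right + (-1:Int) = 0 := by omega
          simp [hst, hz]
        · have hz' : ¬ (left - right + (-1:Int) = 0) := by omega
          have hrec := ih (i + 1) left (right + 1) m stk.dropLast
            hm0 (by omega) (by simp [List.length_dropLast]; omega)
          have harg : left - (right + 1) = left - right + (-1) := by omega
          rw [harg] at hrec
          simp [hst, hz, hz', hrec]

theorem parse_spec : Claim_equal_parse := by
  intro s _
  unfold Spec_parse parse parse_alt
  have h := parseLoop_eq_scanTable s.toList 0 0 0 0 [] (by omega) (by omega) (by simp)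
  simpa using h
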